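-- pv_equiv track=rewrite | github.com/noppakorn/COM-PROG | Homework/Prog-07/Function Test/patterns_of.py | patterns_of
-- ===== SOURCE A (Python) =====
-- l = ['0001101', '0011001', '0010011', '0111101', '0100011', '0110001', '0101111', '0111011', '0110111', '0001011']
--
-- g = ['0100111', '0110011', '0011011', '0100001', '0011101', '0111001', '0000101', '0010001', '0001001', '0010111']
--
-- r = ['1110010', '1100110', '1101100', '1000010', '1011100', '1001110', '1010000', '1000100', '1001000', '1110100']
--
-- def patterns_of(codes):
--     s,nc = '',[]
--     for i in range(len(codes)//7) : nc.append(codes[7*i:7*(i+1)])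
--     for i in nc :
--         if i in l : s += 'L'
--         elif i in g : s += 'G'
--         elif i in r : s += 'R'
--         else : return ''
--     return s
-- ===== SOURCE B (Python) =====
-- l = ['0001101', '0011001', '0010011', '0111101', '0100011', '0110001', '0101111', '0111011', '0110111', '0001011']
--
-- _COMP = {'0': '1', '1': '0'}
--
--
-- def _comp(s):
--     # bitwise complement of a pattern; non-binary chars are left unchanged
--     return ''.join(_COMP.get(ch, ch) for ch in s)
--
--
-- def patterns_of(codes):
--     # EAN-13 structure: the R patterns are the bitwise complement of the L
--     # patterns, and the G patterns are the reversed complement, so a single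
--     # L table classifies everything.
--     out = []
--     rest = codes
--     while len(rest) >= 7:
--         c, rest = rest[:7], rest[7:]
--         if c in l:
--             out.append('L')
--         elif _comp(c[::-1]) in l:
--             out.append('G')
--         elif _comp(c) in l:
--             out.append('R')
--         else:
--             return ''
--     return ''.join(out)
-- ===== Notes on version B (the rewrite author's own statement) =====
-- stated objective: alternative
-- what changed: Drops two of the three pattern tables by exploiting the EAN-13 structural identities (R patterns are the bitwise complement of the L patterns, G patterns their reversed complement): B keeps only the L table and classifies each chunk by membership of the chunk, its reversed complement, and its complement, while consuming the string 7 chars at a time with take/split instead of precomputing a chunk list over range(len//7).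
import Mathlib
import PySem

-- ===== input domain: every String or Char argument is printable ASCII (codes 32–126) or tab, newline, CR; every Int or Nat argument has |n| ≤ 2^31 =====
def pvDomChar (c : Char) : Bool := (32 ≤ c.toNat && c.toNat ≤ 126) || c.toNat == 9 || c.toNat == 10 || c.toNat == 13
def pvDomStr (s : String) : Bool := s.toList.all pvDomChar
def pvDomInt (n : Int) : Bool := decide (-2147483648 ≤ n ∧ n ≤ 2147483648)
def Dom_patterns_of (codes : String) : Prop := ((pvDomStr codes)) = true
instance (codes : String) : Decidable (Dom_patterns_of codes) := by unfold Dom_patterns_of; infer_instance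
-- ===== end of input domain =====

-- B keeps only the L table, classifying each 7-char chunk via the EAN-13 identities (R = complement of L, G = reversed complement) while consuming the string 7 chars at a time (objective: alternative algorithm, no speed claim).

-- ===== PORT A =====
def lA : List (List Char) := ["0001101".toList, "0011001".toList, "0010011".toList, "0111101".toList, "0100011".toList, "0110001".toList, "0101111".toList, "0111011".toList, "0110111".toList, "0001011".toList]
def gA : List (List Char) := ["0100111".toList, "0110011".toList, "0011011".toList, "0100001".toList, "0011101".toList, "0111001".toList, "0000101".toList, "0010001".toList, "0001001".toList, "0010111".toList]
def rA : List (List Char) := ["1110010".toList, "1100110".toList, "1101100".toList, "1000010".toList, "1011100".toList, "1001110".toList, "1010000".toList, "1000100".toList, "1001000".toList, "1110100".toList]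

-- codes[7*i:7*(i+1)]
def pvChunk (cs : List Char) (i : Int) : List Char :=
  PySem.List.slice cs (some (7 * i)) (some (7 * (i + 1)))

-- A's second loop: three membership branches, early return '' on no match
def pvLoopA : List (List Char) → List Char → String
  | [], s => String.ofList s
  | c :: rest, s =>
    if c ∈ lA then pvLoopA rest (s ++ ['L'])
    else if c ∈ gA then pvLoopA rest (s ++ ['G'])
    else if c ∈ rA then pvLoopA rest (s ++ ['R'])
    else ""

def patterns_of (codes : String) : String :=
  -- first loop: nc.append(codes[7*i:7*(i+1)]) over range(len(codes)//7)
  let nc := (PySem.List.pyRange 0 (PySem.Int.floordiv (codes.toList.length : Int) 7) 1).map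
      (pvChunk codes.toList)
  pvLoopA nc []

-- ===== PORT B =====
-- _COMP.get(ch, ch)
def pvComp (ch : Char) : Char := if ch = '0' then '1' else if ch = '1' then '0' else ch

-- _comp(s)
def pvCompL (s : List Char) : List Char := s.map pvComp

-- B's while loop: peel 7 chars, classify against the single L table
def pvGoB (rest : List Char) (out : List Char) : String :=
  if 7 ≤ rest.length then
    let c := rest.take 7
    if c ∈ lA then pvGoB (rest.drop 7) (out ++ ['L'])
    else if pvCompL c.reverse ∈ lA then pvGoB (rest.drop 7) (out ++ ['G'])
    else if pvCompL c ∈ lA then pvGoB (rest.drop 7) (out ++ ['R'])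
    else ""
  else String.ofList out
termination_by rest.length
decreasing_by all_goals simp_all [List.length_drop]; omega

def patterns_of_alt (codes : String) : String := pvGoB codes.toList []

-- ===== PRECONDITION & SPEC =====
def Spec_patterns_of (codes : String) (out : String) : Prop := out = patterns_of_alt codes
instance (codes : String) (out : String) : Decidable (Spec_patterns_of codes out) := by unfold Spec_patterns_of; infer_instance

-- ===== CLAIM (what is proved, stated in full; the proofs are below) =====
def Claim_equal_patterns_of : Prop := ∀ (codes : String), Dom_patterns_of codes → Spec_patterns_of codes (patterns_of codes)

-- ===== LEMMAS AND PROOFS =====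

lemma pvComp_inv (ch : Char) : pvComp (pvComp ch) = ch := by
  by_cases h0 : ch = '0' <;> by_cases h1 : ch = '1' <;> simp [pvComp, h0, h1]

lemma pvCompL_inv (s : List Char) : pvCompL (pvCompL s) = s := by
  simp [pvCompL, List.map_map, Function.comp_def, pvComp_inv]

lemma map_comp_lA : lA.map pvCompL = rA := by decide

lemma map_rev_rA : rA.map List.reverse = gA := by decide

-- chunk ∈ r  ⟺  its complement ∈ l
lemma mem_rA_iff (c : List Char) : c ∈ rA ↔ pvCompL c ∈ lA := by
  constructor
  · intro h
    simp only [rA, List.mem_cons, List.not_mem_nil, or_false] at h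
    rcases h with h|h|h|h|h|h|h|h|h|h <;> subst h <;> decide
  · intro h
    have h2 := List.mem_map_of_mem (f := pvCompL) h
    rw [pvCompL_inv, map_comp_lA] at h2
    exact h2

-- chunk ∈ g  ⟺  its reversed complement ∈ l
lemma mem_gA_iff (c : List Char) : c ∈ gA ↔ pvCompL c.reverse ∈ lA := by
  constructor
  · intro h
    simp only [gA, List.mem_cons, List.not_mem_nil, or_false] at h
    rcases h with h|h|h|h|h|h|h|h|h|h <;> subst h <;> decide
  · intro h
    have h2 : c.reverse ∈ rA := (mem_rA_iff c.reverse).mpr h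
    have h3 := List.mem_map_of_mem (f := List.reverse) h2
    rw [List.reverse_reverse, map_rev_rA] at h3
    exact h3

-- the first chunk is the first 7 chars
lemma chunk_zero (cs : List Char) : pvChunk cs 0 = cs.take 7 := by
  show PySem.List.slice cs (some (7 * 0)) (some (7 * (0 + 1))) = cs.take 7
  norm_num
  rw [PySem.List.slice_to cs (by norm_num)]
  rfl

-- shifting the chunk index by one drops 7 chars
lemma chunk_succ (cs : List Char) (k : Nat) :
    pvChunk cs ((1 : Int) + k) = pvChunk (cs.drop 7) k := by
  unfold pvChunk
  rw [PySem.List.slice_toNat cs (by positivity) (by positivity),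
      PySem.List.slice_toNat (cs.drop 7) (by positivity) (by positivity)]
  rw [List.drop_drop]
  have e1 : (7 * ((1:Int) + (k:Int))).toNat = 7 * k + 7 := by omega
  have e2 : (7 * ((1:Int) + (k:Int) + 1)).toNat = 7 * k + 14 := by omega
  have e3 : (7 * (k:Int)).toNat = 7 * k := by omega
  have e4 : (7 * ((k:Int) + 1)).toNat = 7 * k + 7 := by omega
  rw [e1, e2, e3, e4]
  congr 1
  · omega
  · congr 1
    omega

-- A's chunk list over range(1, n) is B's recursion step
lemma chunks_shift (cs : List Char) (n : Int) :
    (PySem.List.pyRange 1 n 1).map (pvChunk cs)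
      = (PySem.List.pyRange 0 (n - 1) 1).map (pvChunk (cs.drop 7)) := by
  rw [PySem.List.pyRange_one, PySem.List.pyRange_one]
  have : (n - 1 - 0).toNat = (n - 1).toNat := by omega
  rw [this]
  simp only [List.map_map]
  apply List.map_congr_left
  intro k _
  simp only [Function.comp_apply, zero_add]
  exact chunk_succ cs k

lemma loop_eq_fuel (fuel : Nat) : ∀ (cs : List Char), cs.length ≤ fuel → ∀ (s : List Char),
    pvLoopA ((PySem.List.pyRange 0 (PySem.Int.floordiv (cs.length : Int) 7) 1).map (pvChunk cs)) s
      = pvGoB cs s := by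
  induction fuel with
  | zero =>
    intro cs hlen s
    have h0 : cs.length = 0 := by omega
    rw [pvGoB]
    have : PySem.Int.floordiv ((cs.length : Int)) 7 = 0 := by
      rw [h0]; decide
    rw [this, PySem.List.pyRange_one_eq_nil (by norm_num)]
    simp [pvLoopA, h0]
  | succ m ih =>
    intro cs hlen s
    by_cases h7 : 7 ≤ cs.length
    · have hn : PySem.Int.floordiv ((cs.length : Int)) 7 = ((cs.length / 7 : Nat) : Int) := by
        exact_mod_cast PySem.Int.floordiv_natCast cs.length 7
      have hpos : (0 : Int) < ((cs.length / 7 : Nat) : Int) := by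
        have : 1 ≤ cs.length / 7 := Nat.one_le_div_iff (by norm_num) |>.mpr h7
        exact_mod_cast this
      rw [hn, PySem.List.pyRange_one_cons hpos, List.map_cons, chunk_zero]
      have hrec : ((cs.length / 7 : Nat) : Int) - 1
          = PySem.Int.floordiv (((cs.drop 7).length : Int)) 7 := by
        have : (cs.drop 7).length = cs.length - 7 := by simp
        rw [this]
        have h2 : PySem.Int.floordiv (((cs.length - 7 : Nat) : Int)) 7
            = (((cs.length - 7) / 7 : Nat) : Int) :=
          by exact_mod_cast PySem.Int.floordiv_natCast (cs.length - 7) 7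
        rw [h2]
        have : (cs.length - 7) / 7 = cs.length / 7 - 1 := by omega
        rw [this]
        have h1 : 1 ≤ cs.length / 7 := Nat.one_le_div_iff (by norm_num) |>.mpr h7
        omega
      have htail : (PySem.List.pyRange 1 ((cs.length / 7 : Nat) : Int) 1).map (pvChunk cs)
          = (PySem.List.pyRange 0 (PySem.Int.floordiv (((cs.drop 7).length : Int)) 7) 1).map
              (pvChunk (cs.drop 7)) := by
        rw [chunks_shift, hrec]
      have hih : ∀ s', pvLoopA ((PySem.List.pyRange 0
            (PySem.Int.floordiv (((cs.drop 7).length : Int)) 7) 1).map (pvChunk (cs.drop 7))) s'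
          = pvGoB (cs.drop 7) s' := by
        intro s'
        exact ih (cs.drop 7) (by simp; omega) s'
      rw [pvGoB, if_pos h7]
      simp only [pvLoopA, zero_add]
      by_cases hl : cs.take 7 ∈ lA
      · rw [if_pos hl, if_pos hl, htail]
        exact hih _
      · rw [if_neg hl, if_neg hl]
        by_cases hg : cs.take 7 ∈ gA
        · rw [if_pos hg, if_pos ((mem_gA_iff _).mp hg), htail]
          exact hih _
        · rw [if_neg hg, if_neg (fun h => hg ((mem_gA_iff _).mpr h))]
          by_cases hr : cs.take 7 ∈ rA
          · rw [if_pos hr, if_pos ((mem_rA_iff _).mp hr), htail]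
            exact hih _
          · rw [if_neg hr, if_neg (fun h => hr ((mem_rA_iff _).mpr h))]
    · have h0 : PySem.Int.floordiv ((cs.length : Int)) 7 = 0 := by
        have hn : PySem.Int.floordiv ((cs.length : Int)) 7 = ((cs.length / 7 : Nat) : Int) := by
          exact_mod_cast PySem.Int.floordiv_natCast cs.length 7
        rw [hn]
        have : cs.length / 7 = 0 := by omega
        simp [this]
      rw [h0, PySem.List.pyRange_one_eq_nil (by norm_num), pvGoB, if_neg h7]
      rfl

-- ===== VERDICT (by name: the statement is the Claim_ definition above) =====
theorem patterns_of_spec : Claim_equal_patterns_of := by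
  intro codes _
  unfold Spec_patterns_of patterns_of patterns_of_alt
  exact loop_eq_fuel codes.toList.length codes.toList le_rfl []
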